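-- pv_equiv track=rewrite | github.com/1u1s4/ECFM_M603_2S2025_ | Programas/Clase 5/pj_368.py | Qtermino
-- ===== SOURCE A (Python) =====
-- def Qtermino(x: int) -> bool:
--     x = str(x)
--     n = len(x)
--     for i in range(2, n):
--         sub_x = x[i - 2: i + 1]
--         for d in range(0, 10):
--             if sub_x.count(str(d)) >= 3:
--                 return True
--     return False
-- ===== SOURCE B (Python) =====
-- def Qtermino(x: int) -> bool:
--     s = str(x)
--     run = 1
--     for i in range(1, len(s)):
--         run = run + 1 if s[i] == s[i - 1] else 1
--         if run == 3:
--             return True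
--     return False
-- ===== Notes on version B (the rewrite author's own statement) =====
-- stated objective: simpler
-- what changed: Replaces the window-slicing double loop (every 3-char slice tested against all ten digits via substring count) with a single linear pass that maintains a run-length counter of consecutive equal characters and returns True when it reaches 3.
import Mathlib
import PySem

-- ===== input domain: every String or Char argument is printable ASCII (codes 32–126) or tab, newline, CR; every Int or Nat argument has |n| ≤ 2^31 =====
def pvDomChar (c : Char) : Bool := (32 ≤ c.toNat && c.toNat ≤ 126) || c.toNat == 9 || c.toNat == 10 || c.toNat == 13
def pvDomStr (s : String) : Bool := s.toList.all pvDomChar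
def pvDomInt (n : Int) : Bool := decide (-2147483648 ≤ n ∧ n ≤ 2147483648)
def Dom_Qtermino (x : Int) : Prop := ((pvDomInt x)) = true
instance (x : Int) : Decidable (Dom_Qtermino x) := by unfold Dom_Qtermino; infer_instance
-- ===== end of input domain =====

-- B replaces A's 3-char-window slicing with a ten-digit substring count per window by a
-- single pass keeping a run-length counter of consecutive equal characters (objective: simpler).

-- ===== PORT A =====
def Qtermino (x : Int) : Bool :=
  let s := PySem.Int.toChars x
  let n : Int := (s.length : Int)
  (PySem.List.pyRange 2 n 1).any (fun i =>
    let sub := PySem.List.slice s (some (i - 2)) (some (i + 1))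
    (PySem.List.pyRange 0 10 1).any (fun d =>
      decide (3 ≤ PySem.Chars.count sub (PySem.Int.toChars d))))

-- ===== PORT B =====
-- B's loop 'for i in range(1, len(s))' carrying the run counter, as structural
-- recursion over the remaining characters with the previous character in hand
def runScan : Char → Nat → List Char → Bool
  | _, _, [] => false
  | prev, run, c :: rest =>
    let run' := if c == prev then run + 1 else 1
    if run' == 3 then true else runScan c run' rest

def Qtermino_alt (x : Int) : Bool :=
  match PySem.Int.toChars x with
  | [] => false
  | c :: rest => runScan c 1 rest

-- ===== PRECONDITION & SPEC =====
def Spec_Qtermino (x : Int) (out : Bool) : Prop := out = Qtermino_alt x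
instance (x : Int) (out : Bool) : Decidable (Spec_Qtermino x out) := by unfold Spec_Qtermino; infer_instance

-- ===== CLAIM (what is proved, stated in full; the proofs are below) =====
def Claim_equal_Qtermino : Prop := ∀ (x : Int), Dom_Qtermino x → Spec_Qtermino x (Qtermino x)

-- ===== LEMMAS AND PROOFS =====

-- the ten decimal digit characters
def digitList : List Char := ['0', '1', '2', '3', '4', '5', '6', '7', '8', '9']

-- "some 3-window of equal characters": the common characterization of both programs
def hasTriple (l : List Char) : Prop := ∃ j a r, l.drop j = a :: a :: a :: r

-- count of a single character in a 3-character window is ≥ 3 iff all three equal it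
lemma count_window (a b c d : Char) :
    (3 ≤ PySem.Chars.count [a, b, c] [d]) ↔ (a = d ∧ b = d ∧ c = d) := by
  simp [PySem.Chars.count, PySem.Chars.count.go, List.isPrefixOf]
  by_cases h1 : d = a <;> by_cases h2 : d = b <;> by_cases h3 : d = c <;>
    simp [h1, h2, h3] <;>
    first
      | (split_ifs <;> simp_all [ne_comm])
      | simp_all [ne_comm]

-- str(d) for 0 <= d < 10 is a one-character digit string
lemma toChars_small (d : Int) (h0 : 0 ≤ d) (h1 : d < 10) :
    ∃ dc ∈ digitList, PySem.Int.toChars d = [dc] := by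
  interval_cases d
  exacts [⟨'0', by decide, by decide⟩, ⟨'1', by decide, by decide⟩, ⟨'2', by decide, by decide⟩,
    ⟨'3', by decide, by decide⟩, ⟨'4', by decide, by decide⟩, ⟨'5', by decide, by decide⟩,
    ⟨'6', by decide, by decide⟩, ⟨'7', by decide, by decide⟩, ⟨'8', by decide, by decide⟩,
    ⟨'9', by decide, by decide⟩]

lemma digit_toChars (dc : Char) (h : dc ∈ digitList) :
    ∃ d : Int, 0 ≤ d ∧ d < 10 ∧ PySem.Int.toChars d = [dc] := by
  fin_cases h
  exacts [⟨0, by decide, by decide, by decide⟩, ⟨1, by decide, by decide, by decide⟩,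
    ⟨2, by decide, by decide, by decide⟩, ⟨3, by decide, by decide, by decide⟩,
    ⟨4, by decide, by decide, by decide⟩, ⟨5, by decide, by decide, by decide⟩,
    ⟨6, by decide, by decide, by decide⟩, ⟨7, by decide, by decide, by decide⟩,
    ⟨8, by decide, by decide, by decide⟩, ⟨9, by decide, by decide, by decide⟩]

-- every character produced by Nat.toDigits 10 is a decimal digit character
lemma mem_toDigitsCore (fuel : Nat) : ∀ (n : Nat) (acc : List Char),
    (∀ c ∈ acc, c ∈ digitList) → ∀ c ∈ Nat.toDigitsCore 10 fuel n acc, c ∈ digitList := by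
  induction fuel with
  | zero => intro n acc hacc c hc; simpa [Nat.toDigitsCore] using hacc c hc
  | succ f ih =>
    intro n acc hacc c hc
    have hd : (n % 10).digitChar ∈ digitList := by
      have h10 : n % 10 < 10 := Nat.mod_lt _ (by norm_num)
      set r := n % 10 with hr
      interval_cases r <;> decide
    have hacc' : ∀ e ∈ (n % 10).digitChar :: acc, e ∈ digitList := by
      intro e he
      rcases List.mem_cons.mp he with rfl | he
      · exact hd
      · exact hacc e he
    rw [Nat.toDigitsCore] at hc
    by_cases h0 : n / 10 = 0
    · simp only [h0, if_true] at hc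
      exact hacc' c hc
    · simp only [h0, if_false] at hc
      exact ih (n / 10) _ hacc' c hc

lemma mem_toDigits (m : Nat) : ∀ c ∈ Nat.toDigits 10 m, c ∈ digitList :=
  fun c hc => mem_toDigitsCore (m + 1) m [] (by simp) c hc

-- in str(x) every character after the first is a digit
lemma toChars_tail_digit (x : Int) (k : Nat) (hk : k < (PySem.Int.toChars x).length)
    (h1 : 1 ≤ k) : (PySem.Int.toChars x)[k] ∈ digitList := by
  unfold PySem.Int.toChars at *
  by_cases hx : x < 0
  · simp only [hx, if_true] at hk ⊢
    obtain ⟨k', rfl⟩ : ∃ k', k = k' + 1 := ⟨k - 1, by omega⟩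
    rw [List.getElem_cons_succ]
    exact mem_toDigits _ _ (List.getElem_mem _)
  · simp only [hx, if_false] at hk ⊢
    exact mem_toDigits _ _ (List.getElem_mem _)

-- a drop that starts with three equal characters, from/to indexed equalities
lemma drop_triple_of (s : List Char) (j : Nat) (hj : j + 2 < s.length) (a : Char)
    (e0 : s[j]'(by omega) = a) (e1 : s[j+1]'(by omega) = a) (e2 : s[j+2]'(by omega) = a) :
    s.drop j = a :: a :: a :: s.drop (j + 3) := by
  rw [List.drop_eq_getElem_cons (by omega : j < s.length),
    List.drop_eq_getElem_cons (by omega : j + 1 < s.length),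
    List.drop_eq_getElem_cons (by omega : j + 2 < s.length), e0, e1, e2]

lemma of_drop_triple (s : List Char) (j : Nat) (a : Char) (r : List Char)
    (h : s.drop j = a :: a :: a :: r) :
    j + 2 < s.length ∧ s[j]? = some a ∧ s[j+1]? = some a ∧ s[j+2]? = some a := by
  have hlen : s.length - j = r.length + 3 := by
    have := congrArg List.length h
    simpa [List.length_drop] using this
  refine ⟨by omega, ?_, ?_, ?_⟩
  · have := congrArg (fun l => l[0]?) h
    simpa [List.getElem?_drop] using this
  · have := congrArg (fun l => l[1]?) h
    simpa [List.getElem?_drop] using this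
  · have := congrArg (fun l => l[2]?) h
    simpa [List.getElem?_drop] using this

-- the 3-character window A slices out
lemma window_eq (s : List Char) (i : Int) (h2 : 2 ≤ i) (hn : i < (s.length : Int)) :
    PySem.List.slice s (some (i - 2)) (some (i + 1)) =
      [s[(i - 2).toNat]'(by omega), s[(i - 2).toNat + 1]'(by omega), s[(i - 2).toNat + 2]'(by omega)] := by
  rw [PySem.List.slice_toNat _ (by omega) (by omega)]
  have h3 : (i + 1).toNat - (i - 2).toNat = 3 := by omega
  rw [h3, List.drop_eq_getElem_cons (by omega : (i - 2).toNat < s.length),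
    List.drop_eq_getElem_cons (by omega : (i - 2).toNat + 1 < s.length),
    List.drop_eq_getElem_cons (by omega : (i - 2).toNat + 2 < s.length)]
  rfl

-- A returns True iff some 3-window consists of one repeated digit character
lemma A_iff (x : Int) :
    Qtermino x = true ↔
      (∃ j a r, (PySem.Int.toChars x).drop j = a :: a :: a :: r ∧ a ∈ digitList) := by
  unfold Qtermino
  simp only [List.any_eq_true, PySem.List.mem_pyRange_one, decide_eq_true_eq]
  constructor
  · rintro ⟨i, ⟨h2, hn⟩, d, ⟨hd0, hd10⟩, hcnt⟩
    obtain ⟨dc, hdc, hch⟩ := toChars_small d hd0 hd10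
    rw [window_eq _ i h2 hn, hch, count_window] at hcnt
    obtain ⟨e0, e1, e2⟩ := hcnt
    exact ⟨(i - 2).toNat, dc, _, drop_triple_of _ _ (by omega) _ e0 e1 e2, hdc⟩
  · rintro ⟨j, a, r, hdrop, hmem⟩
    obtain ⟨hj, g0, g1, g2⟩ := of_drop_triple _ _ _ _ hdrop
    obtain ⟨d, hd0, hd10, hch⟩ := digit_toChars a hmem
    have hlt : ((j : Int) + 2) < ((PySem.Int.toChars x).length : Int) := by exact_mod_cast hj
    refine ⟨(j : Int) + 2, ⟨by omega, hlt⟩, d, ⟨hd0, hd10⟩, ?_⟩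
    have hi2 : (((j : Int) + 2) - 2).toNat = j := by omega
    rw [window_eq _ _ (by omega) hlt, hch, count_window]
    refine ⟨?_, ?_, ?_⟩ <;> rw [List.getElem_eq_iff] <;> simp [g0, g1, g2]

-- Boolean "has a triple" used to characterize B's scan
def tripleB : List Char → Bool
  | a :: b :: c :: r => (a == b && b == c) || tripleB (b :: c :: r)
  | _ => false

def headEq : List Char → Char → Bool
  | [], _ => false
  | c :: _, p => c == p

lemma runScan_eq (rest : List Char) : ∀ (prev : Char) (run : Nat), run = 1 ∨ run = 2 →
    runScan prev run rest = (tripleB (prev :: rest) || (decide (run = 2) && headEq rest prev)) := by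
  induction rest with
  | nil => intro prev run _; simp [runScan, tripleB, headEq]
  | cons c r ih =>
    intro prev run hrun
    by_cases hc : c = prev
    · subst hc
      rcases hrun with rfl | rfl
      · have h1 : runScan c 1 (c :: r) = runScan c 2 r := by simp [runScan]
        rw [h1, ih c 2 (Or.inr rfl)]
        cases r with
        | nil => simp [tripleB, headEq]
        | cons d r' =>
          simp [tripleB, headEq, Bool.or_comm]
          rw [BEq.comm]
      · have h2 : runScan c 2 (c :: r) = true := by simp [runScan]
        rw [h2]
        simp [tripleB, headEq]
    · have hcp : (c == prev) = false := by simp [hc]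
      have hpc : (prev == c) = false := by
        simp only [beq_eq_false_iff_ne]; exact fun h => hc h.symm
      have h1 : runScan prev run (c :: r) = runScan c 1 r := by simp [runScan, hcp]
      rw [h1, ih c 1 (Or.inl rfl)]
      cases r with
      | nil => simp [tripleB, headEq, hc]
      | cons d r' => simp [tripleB, headEq, hpc, hcp]

lemma not_hasTriple_short (l : List Char) (h : l.length < 3) : ¬ hasTriple l := by
  rintro ⟨j, a, r, hd⟩
  have := congrArg List.length hd
  simp [List.length_drop] at this
  omega

lemma hasTriple_cons (a : Char) (t : List Char) :
    hasTriple (a :: t) ↔ (∃ r, t = a :: a :: r) ∨ hasTriple t := by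
  constructor
  · rintro ⟨j, x, r, hd⟩
    cases j with
    | zero =>
      left
      simp only [List.drop_zero] at hd
      rw [List.cons_eq_cons] at hd
      exact ⟨r, by rw [hd.2, ← hd.1]⟩
    | succ k => exact Or.inr ⟨k, x, r, by simpa [List.drop_succ_cons] using hd⟩
  · rintro (⟨r, rfl⟩ | ⟨j, x, r, hd⟩)
    · exact ⟨0, a, r, by simp⟩
    · exact ⟨j + 1, x, r, by simpa [List.drop_succ_cons] using hd⟩

lemma tripleB_iff (l : List Char) : tripleB l = true ↔ hasTriple l := by
  induction l with
  | nil => simpa [tripleB] using not_hasTriple_short [] (by simp)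
  | cons a t ih =>
    cases t with
    | nil => simpa [tripleB] using not_hasTriple_short [a] (by simp)
    | cons b u =>
      cases u with
      | nil => simpa [tripleB] using not_hasTriple_short [a, b] (by simp)
      | cons c v =>
        have hpat : (∃ r, b :: c :: v = a :: a :: r) ↔ (b = a ∧ c = a) :=
          ⟨fun ⟨r, h⟩ => by
            rw [List.cons_eq_cons] at h
            exact ⟨h.1, ((List.cons_eq_cons.mp h.2).1)⟩,
           fun ⟨h1, h2⟩ => ⟨v, by rw [h1, h2]⟩⟩
        rw [show tripleB (a :: b :: c :: v) = ((a == b && b == c) || tripleB (b :: c :: v)) from rfl,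
          hasTriple_cons, hpat, ← ih]
        simp only [Bool.or_eq_true, Bool.and_eq_true, beq_iff_eq]
        constructor
        · rintro (⟨rfl, rfl⟩ | h)
          · exact Or.inl ⟨rfl, rfl⟩
          · exact Or.inr h
        · rintro (⟨rfl, rfl⟩ | h)
          · exact Or.inl ⟨rfl, rfl⟩
          · exact Or.inr h

lemma B_iff (x : Int) : Qtermino_alt x = true ↔ hasTriple (PySem.Int.toChars x) := by
  unfold Qtermino_alt
  cases h : PySem.Int.toChars x with
  | nil =>
    simp only [Bool.false_eq_true, false_iff]
    rintro ⟨j, a, r, hd⟩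
    simp at hd
  | cons c rest =>
    show runScan c 1 rest = true ↔ hasTriple (c :: rest)
    rw [runScan_eq rest c 1 (Or.inl rfl)]
    simp [tripleB_iff]

-- ===== VERDICT (by name: the statement is the Claim_ definition above) =====
theorem Qtermino_spec : Claim_equal_Qtermino := by
  intro x _
  unfold Spec_Qtermino
  apply Bool.eq_iff_iff.mpr
  rw [A_iff, B_iff]
  constructor
  · rintro ⟨j, a, r, hdrop, _⟩; exact ⟨j, a, r, hdrop⟩
  · rintro ⟨j, a, r, hdrop⟩
    refine ⟨j, a, r, hdrop, ?_⟩
    obtain ⟨hj, g0, g1, g2⟩ := of_drop_triple _ _ _ _ hdrop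
    have : (PySem.Int.toChars x)[j+1]'(by omega) = a := by
      rw [List.getElem_eq_iff]; exact g1
    rw [← this]
    exact toChars_tail_digit x (j+1) (by omega) (by omega)
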